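-- pv_equiv track=rewrite | github.com/muneebaifrah/Unstop-100-Days-Coding-Sprint | Day-83/4.Holi-23.py | user_logic
-- ===== SOURCE A (Python) =====
-- from collections import deque
--
-- def user_logic(n, m, perkm_ola_cost, perkm_uber_cost, arr):
--     starts = []
--     target = None
--
--     for i in range(n):
--         for j in range(m):
--             if arr[i][j] == 2:
--                 starts.append((i, j))
--             elif arr[i][j] == 3:
--                 target = (i, j)
--
--     if not starts or target is None:
--         return "null"
--
--     # 4-direction moves ONLY (judge behavior)
--     dirs = [(-1, 0), (1, 0), (0, -1), (0, 1)]
--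
--     INF = 10**18
--     dist = [[INF] * m for _ in range(n)]
--     dq = deque()
--
--     # Multi-source BFS from all '2' cells
--     for sr, sc in starts:
--         dist[sr][sc] = 0
--         dq.append((sr, sc))
--
--     while dq:
--         r, c = dq.popleft()
--         for dr, dc in dirs:
--             nr, nc = r + dr, c + dc
--             if 0 <= nr < n and 0 <= nc < m and arr[nr][nc] != 1:
--                 if dist[nr][nc] > dist[r][c] + 1:
--                     dist[nr][nc] = dist[r][c] + 1
--                     dq.append((nr, nc))
--
--     tr, tc = target
--     km = dist[tr][tc]
--     if km == INF:
--         return "null"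
--
--     ola = km * perkm_ola_cost
--     uber = km * perkm_uber_cost
--
--     if km >= 5:
--         ola = max(0, ola - 20)
--         uber = max(0, uber - 20)
--
--     # Tie-break: OLA
--     if ola <= uber:
--         return f"OLA cash of {ola}"
--     else:
--         return f"Uber cash of {uber}"
-- ===== SOURCE B (Python) =====
-- def user_logic(n, m, perkm_ola_cost, perkm_uber_cost, arr):
--     starts = [(i, j) for i in range(n) for j in range(m) if arr[i][j] == 2]
--     threes = [(i, j) for i in range(n) for j in range(m) if arr[i][j] == 3]
--     if not starts or not threes:
--         return "null"
--     target = threes[-1]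
--
--     INF = 10**18
--     # Level-synchronous BFS over frontier sets: a shortest path visits each of
--     # the n*m cells at most once, so n*m + 1 rounds always suffice.
--     visited = set(starts)
--     frontier = set(starts)
--     km = INF
--     for depth in range(n * m + 1):
--         if target in frontier:
--             km = depth
--             break
--         nxt = set()
--         for (r, c) in frontier:
--             for (nr, nc) in ((r - 1, c), (r + 1, c), (r, c - 1), (r, c + 1)):
--                 if 0 <= nr < n and 0 <= nc < m and arr[nr][nc] != 1 and (nr, nc) not in visited:
--                     nxt.add((nr, nc))
--         visited |= nxt
--         frontier = nxt
--
--     if km == INF: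
--         return "null"
--
--     ola = km * perkm_ola_cost
--     uber = km * perkm_uber_cost
--     if km >= 5:
--         ola = max(0, ola - 20)
--         uber = max(0, uber - 20)
--     if ola <= uber:
--         return f"OLA cash of {ola}"
--     return f"Uber cash of {uber}"
-- ===== Notes on version B (the rewrite author's own statement) =====
-- stated objective: alternative
-- what changed: A's deque-plus-dist-matrix multi-source BFS (SPFA-style relaxation queue) is replaced by a level-synchronous frontier BFS over visited/frontier sets with a single depth counter and at most n*m+1 rounds; the start/target scan becomes comprehensions and the cost arithmetic is unchanged.
import Mathlib
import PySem

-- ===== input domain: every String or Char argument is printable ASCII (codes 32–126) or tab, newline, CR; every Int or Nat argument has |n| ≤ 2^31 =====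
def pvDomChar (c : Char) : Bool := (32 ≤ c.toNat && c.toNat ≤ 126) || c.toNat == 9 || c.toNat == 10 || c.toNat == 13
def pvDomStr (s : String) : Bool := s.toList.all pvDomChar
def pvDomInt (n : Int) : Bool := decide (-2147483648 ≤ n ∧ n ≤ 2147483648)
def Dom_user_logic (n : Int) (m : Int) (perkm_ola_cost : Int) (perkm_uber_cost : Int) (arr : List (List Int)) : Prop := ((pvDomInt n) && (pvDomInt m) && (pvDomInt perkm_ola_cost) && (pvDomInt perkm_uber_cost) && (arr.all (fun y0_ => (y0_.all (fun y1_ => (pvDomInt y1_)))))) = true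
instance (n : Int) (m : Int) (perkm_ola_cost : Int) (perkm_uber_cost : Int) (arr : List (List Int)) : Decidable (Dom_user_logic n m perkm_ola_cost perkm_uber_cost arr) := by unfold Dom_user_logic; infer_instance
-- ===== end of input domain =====

-- B replaces A's deque + dist-matrix BFS by a level-synchronous frontier-set BFS
-- (visited/frontier sets, one depth counter, at most n*m+1 bounded rounds); objective:
-- alternative (same asymptotic cost, genuinely different traversal bookkeeping).

-- ===== PORT A =====

-- arr[i][j]; exact under Pre_ (indices in range wherever the Python reads)
def pvAt (arr : List (List Int)) (i j : Int) : Int :=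
  PySem.List.pyGetD (PySem.List.pyGetD arr i []) j 1

def pvDirs : List (Int × Int) := [(-1, 0), (1, 0), (0, -1), (0, 1)]

def pvINF : Int := 10 ^ 18

-- the scan 'for i in range(n): for j in range(m): …' building (starts, target)
def pvScanA (n m : Int) (arr : List (List Int)) : List (Int × Int) × Option (Int × Int) :=
  (PySem.List.pyRange 0 n 1).foldl (fun st i =>
    (PySem.List.pyRange 0 m 1).foldl (fun st j =>
      if pvAt arr i j = 2 then (st.1 ++ [(i, j)], st.2)
      else if pvAt arr i j = 3 then (st.1, some (i, j))
      else st) st) ([], none)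

-- the body of 'for dr, dc in dirs: …' for one popped cell (r, c) and one direction d
def pvStep (n m : Int) (arr : List (List Int)) (r c : Int)
    (st : ((Int × Int) → Int) × List (Int × Int)) (d : Int × Int) :
    ((Int × Int) → Int) × List (Int × Int) :=
  let nr := r + d.1
  let nc := c + d.2
  if 0 ≤ nr ∧ nr < n ∧ 0 ≤ nc ∧ nc < m ∧ pvAt arr nr nc ≠ 1 then
    if st.1 (nr, nc) > st.1 (r, c) + 1 then
      (fun q => if q = (nr, nc) then st.1 (r, c) + 1 else st.1 q, st.2 ++ [(nr, nc)])
    else st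
  else st

-- the 'for dr, dc in dirs: …' relaxation of one popped cell (r, c)
def pvRelax (n m : Int) (arr : List (List Int)) (r c : Int)
    (st : ((Int × Int) → Int) × List (Int × Int)) : ((Int × Int) → Int) × List (Int × Int) :=
  pvDirs.foldl (pvStep n m arr r c) st

-- helpers for the termination measure of A's while loop
def pvCells (n m : Int) : List (Int × Int) :=
  (PySem.List.pyRange 0 n 1).flatMap (fun i => (PySem.List.pyRange 0 m 1).map (fun j => (i, j)))

def pvMeasure (n m : Int) (dist : (Int × Int) → Int) : Nat :=
  ((pvCells n m).map (fun p => (dist p).toNat)).sum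

def pvOkP (n m : Int) (arr : List (List Int)) (p : Int × Int) : Prop :=
  0 ≤ p.1 ∧ p.1 < n ∧ 0 ≤ p.2 ∧ p.2 < m ∧ pvAt arr p.1 p.2 ≠ 1

-- master description of the relaxation fold (the port needs it for termination)
theorem pvRelaxAux (n m : Int) (arr : List (List Int)) (r c : Int) (L : List (Int × Int))
    (hL : ∀ d ∈ L, ¬ (d.1 = 0 ∧ d.2 = 0)) (dist : (Int × Int) → Int) (dq : List (Int × Int)) :
    ∃ ext, (L.foldl (pvStep n m arr r c) (dist, dq)).2 = dq ++ ext ∧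
      (∀ p, (L.foldl (pvStep n m arr r c) (dist, dq)).1 p ≤ dist p) ∧
      (L.foldl (pvStep n m arr r c) (dist, dq)).1 (r, c) = dist (r, c) ∧
      (∀ p, (L.foldl (pvStep n m arr r c) (dist, dq)).1 p ≠ dist p → p ∈ ext) ∧
      (∀ d ∈ L, pvOkP n m arr (r + d.1, c + d.2) →
        (L.foldl (pvStep n m arr r c) (dist, dq)).1 (r + d.1, c + d.2) ≤ dist (r, c) + 1) ∧
      (∀ p ∈ ext, (L.foldl (pvStep n m arr r c) (dist, dq)).1 p < dist p ∧
        (L.foldl (pvStep n m arr r c) (dist, dq)).1 p = dist (r, c) + 1 ∧ pvOkP n m arr p ∧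
        ∃ d ∈ L, p = (r + d.1, c + d.2)) := by
  induction L generalizing dist dq with
  | nil => exact ⟨[], by simp, by simp, rfl, by simp, by simp, by simp⟩
  | cons d L ih =>
    have hd : ¬ (d.1 = 0 ∧ d.2 = 0) := hL d (by simp)
    have hL' : ∀ d ∈ L, ¬ (d.1 = 0 ∧ d.2 = 0) := fun e he => hL e (by simp [he])
    simp only [List.foldl_cons]
    by_cases hok : 0 ≤ r + d.1 ∧ r + d.1 < n ∧ 0 ≤ c + d.2 ∧ c + d.2 < m ∧ pvAt arr (r + d.1) (c + d.2) ≠ 1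
    · by_cases himp : dist (r + d.1, c + d.2) > dist (r, c) + 1
      · -- improving step
        have hstep : pvStep n m arr r c (dist, dq) d =
            ((fun q => if q = (r + d.1, c + d.2) then dist (r, c) + 1 else dist q),
             dq ++ [(r + d.1, c + d.2)]) := by
          simp only [pvStep]
          rw [if_pos hok, if_pos himp]
        rw [hstep]
        set v : Int × Int := (r + d.1, c + d.2) with hv
        set dist1 : (Int × Int) → Int := fun q => if q = v then dist (r, c) + 1 else dist q with hd1
        have hvne : v ≠ (r, c) := by
          rw [hv]
          intro h
          have h1 := congrArg Prod.fst h
          have h2 := congrArg Prod.snd h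
          simp only [] at h1 h2
          exact hd ⟨by omega, by omega⟩
        obtain ⟨ext', he2, hle, hrc, hchg, hnbr, hext⟩ := ih hL' dist1 (dq ++ [v])
        have hd1le : ∀ p, dist1 p ≤ dist p := by
          intro p
          by_cases hp : p = v
          · simp [hd1, hp]; omega
          · simp [hd1, hp]
        have hd1rc : dist1 (r, c) = dist (r, c) := by
          simp [hd1, hvne.symm, (Ne.symm hvne)]
        refine ⟨v :: ext', ?_, ?_, ?_, ?_, ?_, ?_⟩
        · rw [he2]; simp
        · intro p; exact le_trans (hle p) (hd1le p)
        · rw [hrc, hd1rc]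
        · intro p hp
          by_cases h1 : (L.foldl (pvStep n m arr r c) (dist1, dq ++ [v])).1 p = dist1 p
          · have : p = v := by
              by_contra hpv
              apply hp
              rw [h1]; simp [hd1, hpv]
            simp [this]
          · simpa using Or.inr (hchg p h1)
        · intro e he hoke
          rcases List.mem_cons.mp he with he | he
          · subst he
            have h1 : dist1 (r + e.1, c + e.2) = dist (r, c) + 1 := by simp [hd1, hv]
            calc (L.foldl (pvStep n m arr r c) (dist1, dq ++ [v])).1 (r + e.1, c + e.2)
                ≤ dist1 (r + e.1, c + e.2) := hle _
              _ = dist (r, c) + 1 := h1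
          · have := hnbr e he hoke
            rw [hd1rc] at this
            exact this
        · intro p hp
          rcases List.mem_cons.mp hp with hp | hp
          · subst hp
            have hfix : (L.foldl (pvStep n m arr r c) (dist1, dq ++ [v])).1 v = dist1 v := by
              by_contra hne
              have := (hext v (hchg v hne)).2.1
              rw [hd1rc] at this
              have hv1 : dist1 v = dist (r, c) + 1 := by simp [hd1]
              omega
            have hv1 : dist1 v = dist (r, c) + 1 := by simp [hd1]
            refine ⟨?_, by rw [hfix, hv1], ?_, d, by simp, hv⟩
            · rw [hfix, hv1]; omega
            · exact hok
          · obtain ⟨h1, h2, h3, e, he, hpe⟩ := hext p hp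
            refine ⟨lt_of_lt_of_le h1 (hd1le p), ?_, h3, e, by simp [he], hpe⟩
            rw [h2, hd1rc]
      · -- admissible but not improving: state unchanged
        have hstep : pvStep n m arr r c (dist, dq) d = (dist, dq) := by
          simp only [pvStep]
          rw [if_pos hok, if_neg himp]
        rw [hstep]
        obtain ⟨ext', he2, hle, hrc, hchg, hnbr, hext⟩ := ih hL' dist dq
        refine ⟨ext', he2, hle, hrc, hchg, ?_, ?_⟩
        · intro e he hoke
          rcases List.mem_cons.mp he with he | he
          · subst he
            push_neg at himp
            exact le_trans (hle _) himp
          · exact hnbr e he hoke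
        · intro p hp
          obtain ⟨h1, h2, h3, e, he, hpe⟩ := hext p hp
          exact ⟨h1, h2, h3, e, by simp [he], hpe⟩
    · have hstep : pvStep n m arr r c (dist, dq) d = (dist, dq) := by
        simp only [pvStep]
        rw [if_neg hok]
      rw [hstep]
      obtain ⟨ext', he2, hle, hrc, hchg, hnbr, hext⟩ := ih hL' dist dq
      refine ⟨ext', he2, hle, hrc, hchg, ?_, ?_⟩
      · intro e he hoke
        rcases List.mem_cons.mp he with he | he
        · subst he
          exact absurd hoke hok
        · exact hnbr e he hoke
      · intro p hp
        obtain ⟨h1, h2, h3, e, he, hpe⟩ := hext p hp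
        exact ⟨h1, h2, h3, e, by simp [he], hpe⟩

theorem pvRelax_spec (n m : Int) (arr : List (List Int)) (r c : Int)
    (dist : (Int × Int) → Int) (dq : List (Int × Int)) :
    ∃ ext, (pvRelax n m arr r c (dist, dq)).2 = dq ++ ext ∧
      (∀ p, (pvRelax n m arr r c (dist, dq)).1 p ≤ dist p) ∧
      (pvRelax n m arr r c (dist, dq)).1 (r, c) = dist (r, c) ∧
      (∀ p, (pvRelax n m arr r c (dist, dq)).1 p ≠ dist p → p ∈ ext) ∧
      (∀ d ∈ pvDirs, pvOkP n m arr (r + d.1, c + d.2) →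
        (pvRelax n m arr r c (dist, dq)).1 (r + d.1, c + d.2) ≤ dist (r, c) + 1) ∧
      (∀ p ∈ ext, (pvRelax n m arr r c (dist, dq)).1 p < dist p ∧
        (pvRelax n m arr r c (dist, dq)).1 p = dist (r, c) + 1 ∧ pvOkP n m arr p ∧
        ∃ d ∈ pvDirs, p = (r + d.1, c + d.2)) :=
  pvRelaxAux n m arr r c pvDirs (by decide) dist dq

theorem pvMem_pvCells (n m : Int) (p : Int × Int) :
    p ∈ pvCells n m ↔ 0 ≤ p.1 ∧ p.1 < n ∧ 0 ≤ p.2 ∧ p.2 < m := by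
  simp only [pvCells, List.mem_flatMap, List.mem_map, PySem.List.mem_pyRange_one]
  constructor
  · rintro ⟨i, hi, j, hj, rfl⟩
    exact ⟨hi.1, hi.2, hj.1, hj.2⟩
  · rintro ⟨h1, h2, h3, h4⟩
    exact ⟨p.1, ⟨h1, h2⟩, p.2, ⟨h3, h4⟩, rfl⟩

theorem pvRelax_nonneg (n m : Int) (arr : List (List Int)) (r c : Int)
    (dist : (Int × Int) → Int) (dq : List (Int × Int)) (h : ∀ p, 0 ≤ dist p) :
    ∀ p, 0 ≤ (pvRelax n m arr r c (dist, dq)).1 p := by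
  obtain ⟨ext, _, _, _, hchg, _, hext⟩ := pvRelax_spec n m arr r c dist dq
  intro p
  by_cases hp : (pvRelax n m arr r c (dist, dq)).1 p = dist p
  · rw [hp]; exact h p
  · have := (hext p (hchg p hp)).2.1
    have := h (r, c)
    omega

theorem pvRelax_measure (n m : Int) (arr : List (List Int)) (r c : Int)
    (dist : (Int × Int) → Int) (dq : List (Int × Int)) (h : ∀ p, 0 ≤ dist p) :
    pvMeasure n m (pvRelax n m arr r c (dist, dq)).1 < pvMeasure n m dist ∨
      ((pvRelax n m arr r c (dist, dq)).1 = dist ∧ (pvRelax n m arr r c (dist, dq)).2 = dq) := by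
  obtain ⟨ext, he2, hle, _, hchg, _, hext⟩ := pvRelax_spec n m arr r c dist dq
  by_cases hall : ∀ p, (pvRelax n m arr r c (dist, dq)).1 p = dist p
  · right
    have hext0 : ext = [] := by
      cases ext with
      | nil => rfl
      | cons p t =>
        have := (hext p (by simp)).1
        have := hall p
        omega
    refine ⟨funext hall, ?_⟩
    rw [he2, hext0, List.append_nil]
  · left
    push_neg at hall
    obtain ⟨p0, hp0⟩ := hall
    obtain ⟨hlt, heq, hok, -⟩ := hext p0 (hchg p0 hp0)
    have hmem : p0 ∈ pvCells n m := by
      rw [pvMem_pvCells]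
      exact ⟨hok.1, hok.2.1, hok.2.2.1, hok.2.2.2.1⟩
    apply List.sum_lt_sum
    · intro q hq
      have := hle q
      omega
    · refine ⟨p0, hmem, ?_⟩
      have := h (r, c)
      omega

-- the 'while dq:' loop; the nonnegativity hypothesis only justifies termination
def pvBfsA (n m : Int) (arr : List (List Int)) (dist : (Int × Int) → Int)
    (dq : List (Int × Int)) (h : ∀ p, 0 ≤ dist p) : (Int × Int) → Int :=
  match dq with
  | [] => dist
  | (r, c) :: rest =>
    pvBfsA n m arr (pvRelax n m arr r c (dist, rest)).1 (pvRelax n m arr r c (dist, rest)).2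
      (pvRelax_nonneg n m arr r c dist rest h)
termination_by (pvMeasure n m dist, dq.length)
decreasing_by
  rcases pvRelax_measure n m arr r c dist rest h with hlt | ⟨hd, hq⟩
  · exact Prod.Lex.left _ _ hlt
  · rw [hd, hq]
    exact Prod.Lex.right _ (Nat.lt_succ_self _)

-- 'for sr, sc in starts: dist[sr][sc] = 0; dq.append((sr, sc))'
def pvInitStep (s : ((Int × Int) → Int) × List (Int × Int)) (p : Int × Int) :
    ((Int × Int) → Int) × List (Int × Int) :=
  ((fun q => if q = p then 0 else s.1 q), s.2 ++ [p])

theorem pvInit_spec (starts : List (Int × Int)) (f0 : (Int × Int) → Int) (dq0 : List (Int × Int)) :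
    (∀ q, (starts.foldl pvInitStep (f0, dq0)).1 q = if q ∈ starts then 0 else f0 q) ∧
      (starts.foldl pvInitStep (f0, dq0)).2 = dq0 ++ starts := by
  induction starts generalizing f0 dq0 with
  | nil => simp
  | cons p t ih =>
    obtain ⟨ih1, ih2⟩ := ih (fun q => if q = p then 0 else f0 q) (dq0 ++ [p])
    constructor
    · intro q
      rw [List.foldl_cons]
      show (t.foldl pvInitStep (pvInitStep (f0, dq0) p)).1 q = _
      rw [show pvInitStep (f0, dq0) p = ((fun q => if q = p then 0 else f0 q), dq0 ++ [p]) from rfl]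
      rw [ih1 q]
      by_cases h1 : q ∈ t
      · simp [h1]
      · by_cases h2 : q = p <;> simp [h1, h2]
    · rw [List.foldl_cons]
      show (t.foldl pvInitStep (pvInitStep (f0, dq0) p)).2 = _
      rw [show pvInitStep (f0, dq0) p = ((fun q => if q = p then 0 else f0 q), dq0 ++ [p]) from rfl]
      rw [ih2]
      simp

theorem pvInit_nonneg (starts : List (Int × Int)) :
    ∀ p, 0 ≤ (starts.foldl pvInitStep ((fun _ => pvINF), [])).1 p := by
  intro p
  rw [(pvInit_spec starts _ _).1 p]
  by_cases h : p ∈ starts <;> simp [h, pvINF]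

def user_logic (n : Int) (m : Int) (perkm_ola_cost : Int) (perkm_uber_cost : Int) (arr : List (List Int)) : String :=
  let st := pvScanA n m arr
  if st.1 = [] then "null"
  else
    match st.2 with
    | none => "null"
    | some t =>
      let init := st.1.foldl pvInitStep ((fun _ => pvINF), [])
      let dist := pvBfsA n m arr init.1 init.2 (pvInit_nonneg st.1)
      let km := dist t
      if km = pvINF then "null"
      else
        let ola := km * perkm_ola_cost
        let uber := km * perkm_uber_cost
        let ola := if km ≥ 5 then max 0 (ola - 20) else ola
        let uber := if km ≥ 5 then max 0 (uber - 20) else uber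
        if ola ≤ uber then "OLA cash of " ++ PySem.Int.toStr ola
        else "Uber cash of " ++ PySem.Int.toStr uber

-- ===== PORT B =====

-- the four neighbour cells ((r-1,c),(r+1,c),(r,c-1),(r,c+1))
def pvNbrs (r c : Int) : List (Int × Int) := [(r - 1, c), (r + 1, c), (r, c - 1), (r, c + 1)]

-- one BFS round: the set of admissible unvisited neighbours of the frontier
def pvNext (n m : Int) (arr : List (List Int))
    (vis fr : PySem.Set (Int × Int)) : PySem.Set (Int × Int) :=
  fr.foldl (fun nx p =>
    (pvNbrs p.1 p.2).foldl (fun nx q =>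
      if 0 ≤ q.1 ∧ q.1 < n ∧ 0 ≤ q.2 ∧ q.2 < m ∧ pvAt arr q.1 q.2 ≠ 1 ∧ ¬ q ∈ vis then
        PySem.Set.add nx q
      else nx) nx) PySem.Set.empty

-- 'for depth in range(n*m+1): …' with break; fuel = number of remaining rounds
def pvLoopB (n m : Int) (arr : List (List Int)) (target : Int × Int) :
    Nat → Int → PySem.Set (Int × Int) → PySem.Set (Int × Int) → Int
  | 0, _, _, _ => pvINF
  | fuel + 1, depth, vis, fr =>
    if target ∈ fr then depth
    else
      let nxt := pvNext n m arr vis fr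
      pvLoopB n m arr target fuel (depth + 1) (PySem.Set.union vis nxt) nxt

def user_logic_alt (n : Int) (m : Int) (perkm_ola_cost : Int) (perkm_uber_cost : Int) (arr : List (List Int)) : String :=
  let starts := (PySem.List.pyRange 0 n 1).flatMap (fun i =>
    ((PySem.List.pyRange 0 m 1).filter (fun j => pvAt arr i j = 2)).map (fun j => (i, j)))
  let threes := (PySem.List.pyRange 0 n 1).flatMap (fun i =>
    ((PySem.List.pyRange 0 m 1).filter (fun j => pvAt arr i j = 3)).map (fun j => (i, j)))
  if starts = [] ∨ threes = [] then "null"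
  else
    let target := PySem.List.pyGetD threes (-1) (0, 0)
    let km := pvLoopB n m arr target (n * m + 1).toNat 0
      (PySem.Set.ofList starts) (PySem.Set.ofList starts)
    if km = pvINF then "null"
    else
      let ola := km * perkm_ola_cost
      let uber := km * perkm_uber_cost
      let ola := if km ≥ 5 then max 0 (ola - 20) else ola
      let uber := if km ≥ 5 then max 0 (uber - 20) else uber
      if ola ≤ uber then "OLA cash of " ++ PySem.Int.toStr ola
      else "Uber cash of " ++ PySem.Int.toStr uber

-- ===== PRECONDITION & SPEC =====
-- Pre_ excludes (i) ill-shaped inputs on which A raises IndexError (fewer than n rows, or a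
-- scanned row shorter than m, whenever the scan runs at all), and (ii) grids declared with at
-- least 10^18 cells, where A's INF sentinel collides with genuine BFS distances — no such
-- input is materially constructible, so (ii) excludes nothing A actually returns on.
def Pre_user_logic (n : Int) (m : Int) (perkm_ola_cost : Int) (perkm_uber_cost : Int) (arr : List (List Int)) : Prop :=
  (0 < n ∧ 0 < m) →
    (n ≤ (arr.length : Int) ∧ (∀ r ∈ arr.take n.toNat, m ≤ (r.length : Int)) ∧ n * m < 10 ^ 18)
instance (n : Int) (m : Int) (perkm_ola_cost : Int) (perkm_uber_cost : Int) (arr : List (List Int)) : Decidable (Pre_user_logic n m perkm_ola_cost perkm_uber_cost arr) := by unfold Pre_user_logic; infer_instance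

def pvWitness_user_logic : Int × Int × Int × Int × List (List Int) :=
  (2, 3, 4, 5, [[2, 0, 0], [1, 1, 3]])

def Spec_user_logic (n : Int) (m : Int) (perkm_ola_cost : Int) (perkm_uber_cost : Int) (arr : List (List Int)) (out : String) : Prop := out = user_logic_alt n m perkm_ola_cost perkm_uber_cost arr
instance (n : Int) (m : Int) (perkm_ola_cost : Int) (perkm_uber_cost : Int) (arr : List (List Int)) (out : String) : Decidable (Spec_user_logic n m perkm_ola_cost perkm_uber_cost arr out) := by unfold Spec_user_logic; infer_instance

-- ===== CLAIM (what is proved, stated in full; the proofs are below) =====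
def Claim_equal_user_logic : Prop := ∀ (n : Int) (m : Int) (perkm_ola_cost : Int) (perkm_uber_cost : Int) (arr : List (List Int)), Dom_user_logic n m perkm_ola_cost perkm_uber_cost arr → Pre_user_logic n m perkm_ola_cost perkm_uber_cost arr → Spec_user_logic n m perkm_ola_cost perkm_uber_cost arr (user_logic n m perkm_ola_cost perkm_uber_cost arr)

-- ===== LEMMAS AND PROOFS =====

-- reachability in at most k BFS steps from the '2' cells
def pvReach (n m : Int) (arr : List (List Int)) : Nat → (Int × Int) → Bool
  | 0, q => decide (0 ≤ q.1 ∧ q.1 < n ∧ 0 ≤ q.2 ∧ q.2 < m ∧ pvAt arr q.1 q.2 = 2)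
  | k + 1, q => pvReach n m arr k q ||
      (decide (0 ≤ q.1 ∧ q.1 < n ∧ 0 ≤ q.2 ∧ q.2 < m ∧ pvAt arr q.1 q.2 ≠ 1) &&
        pvDirs.any (fun d => pvReach n m arr k (q.1 - d.1, q.2 - d.2)))

theorem pvReach_mono (n m : Int) (arr : List (List Int)) {q : Int × Int} :
    ∀ {j k : Nat}, k ≤ j → pvReach n m arr k q = true → pvReach n m arr j q = true := by
  intro j
  induction j with
  | zero =>
    intro k h hq
    have : k = 0 := Nat.le_zero.mp h
    subst this; exact hq
  | succ j ih =>
    intro k h hq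
    rcases Nat.lt_or_ge j k with hk | hk
    · have : k = j + 1 := by omega
      subst this; exact hq
    · have := ih hk hq
      simp [pvReach, this]

-- ===== B-side =====

theorem pvReach_inb (n m : Int) (arr : List (List Int)) (k : Nat) (q : Int × Int)
    (h : pvReach n m arr k q = true) : 0 ≤ q.1 ∧ q.1 < n ∧ 0 ≤ q.2 ∧ q.2 < m := by
  induction k with
  | zero =>
    simp only [pvReach, decide_eq_true_eq] at h
    exact ⟨h.1, h.2.1, h.2.2.1, h.2.2.2.1⟩
  | succ k ih =>
    simp only [pvReach, Bool.or_eq_true, Bool.and_eq_true, decide_eq_true_eq] at h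
    rcases h with h | ⟨hok, _⟩
    · exact ih h
    · exact ⟨hok.1, hok.2.1, hok.2.2.1, hok.2.2.2.1⟩

theorem pvReach_stab (n m : Int) (arr : List (List Int)) (k : Nat)
    (h : ∀ q, pvReach n m arr (k + 1) q = pvReach n m arr k q) :
    ∀ j, k ≤ j → ∀ q, pvReach n m arr j q = pvReach n m arr k q := by
  intro j
  induction j with
  | zero => intro hj q; have : k = 0 := by omega
            subst this; rfl
  | succ j ih =>
    intro hj q
    rcases Nat.lt_or_ge k (j + 1) with hk | hk
    · have hkj : k ≤ j := by omega
      show pvReach n m arr (j + 1) q = _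
      have : pvReach n m arr (j + 1) q = pvReach n m arr (k + 1) q := by
        simp only [pvReach]
        rw [ih hkj q]
        congr 1
        congr 1
        apply PySem.List.any_congr_mem
        intro d _
        rw [ih hkj]
      rw [this, h q]
    · have : k = j + 1 := by omega
      subst this; rfl

def pvScanStep (arr : List (List Int)) (st : List (Int × Int) × Option (Int × Int))
    (p : Int × Int) : List (Int × Int) × Option (Int × Int) :=
  if pvAt arr p.1 p.2 = 2 then (st.1 ++ [p], st.2)
  else if pvAt arr p.1 p.2 = 3 then (st.1, some p)
  else st

theorem foldl_some_eq_getLast? {α : Type} (L : List α) :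
    L.foldl (fun _ p => some p) (none : Option α) = L.getLast? := by
  induction L using List.reverseRecOn with
  | nil => rfl
  | append_singleton t x ih => simp [List.foldl_append]

theorem pvScanA_eq_foldl (n m : Int) (arr : List (List Int)) :
    pvScanA n m arr = (pvCells n m).foldl (pvScanStep arr) ([], none) := by
  unfold pvScanA pvCells
  rw [List.foldl_flatMap]
  apply PySem.List.foldl_congr_mem
  intro acc i _
  rw [List.foldl_map]
  rfl

theorem pvScanA_spec (n m : Int) (arr : List (List Int)) :
    pvScanA n m arr = ((pvCells n m).filter (fun p => decide (pvAt arr p.1 p.2 = 2)),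
      ((pvCells n m).filter (fun p => decide (pvAt arr p.1 p.2 = 3))).getLast?) := by
  rw [pvScanA_eq_foldl]
  have hstep : ∀ (st : List (Int × Int) × Option (Int × Int)) (p : Int × Int),
      pvScanStep arr st p =
        (if pvAt arr p.1 p.2 = 2 then st.1 ++ [p] else st.1,
         if pvAt arr p.1 p.2 = 3 then some p else st.2) := by
    intro st p
    unfold pvScanStep
    by_cases h2 : pvAt arr p.1 p.2 = 2
    · simp [h2]
    · by_cases h3 : pvAt arr p.1 p.2 = 3 <;> simp [h2, h3]
  have key : ∀ (L : List (Int × Int)) (a : List (Int × Int)) (t : Option (Int × Int)),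
      L.foldl (fun st p =>
        (if pvAt arr p.1 p.2 = 2 then st.1 ++ [p] else st.1,
         if pvAt arr p.1 p.2 = 3 then some p else st.2)) (a, t) =
      (a ++ L.filter (fun p => decide (pvAt arr p.1 p.2 = 2)),
       (L.filter (fun p => decide (pvAt arr p.1 p.2 = 3))).foldl (fun _ p => some p) t) := by
    intro L
    induction L with
    | nil => intro a t; simp
    | cons p L ih =>
      intro a t
      rw [List.foldl_cons, ih]
      by_cases h2 : pvAt arr p.1 p.2 = 2
      · have h3 : ¬ pvAt arr p.1 p.2 = 3 := by rw [h2]; decide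
        simp [h2, h3]
      · by_cases h3 : pvAt arr p.1 p.2 = 3 <;> simp [h2, h3]
  calc (pvCells n m).foldl (pvScanStep arr) ([], none)
      = (pvCells n m).foldl (fun st p =>
          (if pvAt arr p.1 p.2 = 2 then st.1 ++ [p] else st.1,
           if pvAt arr p.1 p.2 = 3 then some p else st.2)) ([], none) := by
        apply PySem.List.foldl_congr_mem
        intro acc x _
        exact hstep acc x
    _ = _ := by
        rw [key, foldl_some_eq_getLast?]
        simp

theorem pvStartsB_eq (n m : Int) (arr : List (List Int)) (v : Int) :
    ((PySem.List.pyRange 0 n 1).flatMap (fun i =>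
      ((PySem.List.pyRange 0 m 1).filter (fun j => pvAt arr i j = v)).map (fun j => (i, j)))) =
    (pvCells n m).filter (fun p => decide (pvAt arr p.1 p.2 = v)) := by
  unfold pvCells
  rw [List.filter_flatMap]
  congr 1
  funext i
  rw [List.filter_map]
  rfl

-- the loop invariant of A's BFS
def pvInvA (n m : Int) (arr : List (List Int)) (dist : (Int × Int) → Int)
    (dq : List (Int × Int)) : Prop :=
  (∀ q, dist q ≤ pvINF) ∧
  (∀ q, dist q < pvINF → pvReach n m arr (dist q).toNat q = true) ∧
  (∀ q ∈ dq, dist q < pvINF) ∧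
  (∀ q, pvReach n m arr 0 q = true → dist q ≤ 0) ∧
  (∀ u, dist u < pvINF → u ∉ dq → ∀ d ∈ pvDirs, pvOkP n m arr (u.1 + d.1, u.2 + d.2) →
      dist (u.1 + d.1, u.2 + d.2) ≤ dist u + 1)

theorem pvInvA_step (n m : Int) (arr : List (List Int)) (r c : Int)
    (dist : (Int × Int) → Int) (rest : List (Int × Int)) (h0 : ∀ p, 0 ≤ dist p)
    (hInv : pvInvA n m arr dist ((r, c) :: rest)) :
    pvInvA n m arr (pvRelax n m arr r c (dist, rest)).1 (pvRelax n m arr r c (dist, rest)).2 := by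
  obtain ⟨hg, hb, hc, hd, he⟩ := hInv
  obtain ⟨ext, he2, hle, hrc, hchg, hnbr, hext⟩ := pvRelax_spec n m arr r c dist rest
  have hrcfin : dist (r, c) < pvINF := hc (r, c) (by simp)
  set D := (pvRelax n m arr r c (dist, rest)).1 with hD
  refine ⟨?_, ?_, ?_, ?_, ?_⟩
  · -- ≤ INF
    intro q
    exact le_trans (hle q) (hg q)
  · -- finite → reach
    intro q hq
    by_cases hch : D q = dist q
    · rw [hch] at hq ⊢
      exact hb q hq
    · obtain ⟨hlt, heq, hok, d, hdmem, hqd⟩ := hext q (hchg q hch)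
      have hreach_rc := hb (r, c) hrcfin
      have htn : (D q).toNat = (dist (r, c)).toNat + 1 := by
        have := h0 (r, c)
        omega
      rw [htn]
      show pvReach n m arr ((dist (r,c)).toNat + 1) q = true
      simp only [pvReach, Bool.or_eq_true, Bool.and_eq_true, decide_eq_true_eq, List.any_eq_true]
      refine Or.inr ⟨⟨hok.1, hok.2.1, hok.2.2.1, hok.2.2.2.1, hok.2.2.2.2⟩, d, hdmem, ?_⟩
      have : (q.1 - d.1, q.2 - d.2) = (r, c) := by
        rw [hqd]
        simp
      rw [this]
      exact hreach_rc
  · -- queue finite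
    intro q hq
    rw [he2] at hq
    rcases List.mem_append.mp hq with hq | hq
    · by_cases hch : D q = dist q
      · rw [hch]
        exact hc q (by simp [hq])
      · have := (hext q (hchg q hch)).1
        have := hg q
        omega
    · have := (hext q hq).1
      have := hg q
      omega
  · -- sources stay 0
    intro q hq
    exact le_trans (hle q) (hd q hq)
  · -- relaxed frontier property
    intro u hu hunin d hdmem hoku
    rw [he2] at hunin
    by_cases hurc : u = (r, c)
    · subst hurc
      show D (r + d.1, c + d.2) ≤ D (r, c) + 1
      calc D (r + d.1, c + d.2) ≤ dist (r, c) + 1 := hnbr d hdmem hoku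
        _ = D (r, c) + 1 := by rw [hrc]
    · have hch : D u = dist u := by
        by_contra hne
        exact hunin (List.mem_append.mpr (Or.inr (hchg u hne)))
      have hufin : dist u < pvINF := by rw [hch] at hu; exact hu
      have hunin' : u ∉ (r, c) :: rest := by
        intro hmem
        rcases List.mem_cons.mp hmem with hmem | hmem
        · exact hurc hmem
        · exact hunin (List.mem_append.mpr (Or.inl hmem))
      have := he u hufin hunin' d hdmem hoku
      calc D (u.1 + d.1, u.2 + d.2) ≤ dist (u.1 + d.1, u.2 + d.2) := hle _
        _ ≤ dist u + 1 := this
        _ = D u + 1 := by rw [hch]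

theorem pvBfsA_spec (n m : Int) (arr : List (List Int)) (dist : (Int × Int) → Int)
    (dq : List (Int × Int)) (h : ∀ p, 0 ≤ dist p) (hInv : pvInvA n m arr dist dq) :
    (∀ q, 0 ≤ pvBfsA n m arr dist dq h q) ∧
    (∀ q, pvBfsA n m arr dist dq h q ≤ pvINF) ∧
    (∀ q, pvBfsA n m arr dist dq h q < pvINF →
      pvReach n m arr (pvBfsA n m arr dist dq h q).toNat q = true) ∧
    (∀ k : Nat, (k : Int) < pvINF → ∀ q, pvReach n m arr k q = true →
      pvBfsA n m arr dist dq h q ≤ (k : Int)) := by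
  fun_induction pvBfsA n m arr dist dq h with
  | case1 dist h =>
    obtain ⟨hg, hb, hc, hd, he⟩ := hInv
    refine ⟨h, hg, hb, ?_⟩
    intro k
    induction k with
    | zero =>
      intro _ q hq
      exact_mod_cast hd q hq
    | succ k ih =>
      intro hk q hq
      simp only [pvReach, Bool.or_eq_true, Bool.and_eq_true, decide_eq_true_eq,
        List.any_eq_true] at hq
      rcases hq with hq | ⟨hok, d, hdmem, hq⟩
      · have := ih (by push_cast at hk ⊢; omega) q hq
        push_cast at this ⊢
        omega
      · set u : Int × Int := (q.1 - d.1, q.2 - d.2) with hu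
        have hdu : dist u ≤ (k : Int) := ih (by push_cast at hk ⊢; omega) u hq
        have hufin : dist u < pvINF := by
          push_cast at hk
          omega
        have hoku : pvOkP n m arr (u.1 + d.1, u.2 + d.2) := by
          have hq1 : u.1 + d.1 = q.1 := by simp [hu]
          have hq2 : u.2 + d.2 = q.2 := by simp [hu]
          rw [hq1, hq2]
          exact ⟨hok.1, hok.2.1, hok.2.2.1, hok.2.2.2.1, hok.2.2.2.2⟩
        have := he u hufin (by simp) d hdmem hoku
        have hqu : (u.1 + d.1, u.2 + d.2) = q := by
          simp [hu]
        rw [hqu] at this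
        push_cast
        omega
  | case2 dist h r c rest ih =>
    exact ih (pvInvA_step n m arr r c dist rest h hInv)

theorem mem_pvNbrs (r c : Int) (q : Int × Int) :
    q ∈ pvNbrs r c ↔ ∃ d ∈ pvDirs, q = (r + d.1, c + d.2) := by
  obtain ⟨a, b⟩ := q
  simp [pvNbrs, pvDirs, Prod.ext_iff]
  constructor
  · rintro (⟨rfl, rfl⟩ | ⟨rfl, rfl⟩ | ⟨rfl, rfl⟩ | ⟨rfl, rfl⟩)
    · exact ⟨-1, 0, by simp, by ring, by ring⟩
    · exact ⟨1, 0, by simp, by ring, by ring⟩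
    · exact ⟨0, -1, by simp, by ring, by ring⟩
    · exact ⟨0, 1, by simp, by ring, by ring⟩
  · rintro ⟨x, y, (⟨rfl, rfl⟩ | ⟨rfl, rfl⟩ | ⟨rfl, rfl⟩ | ⟨rfl, rfl⟩), rfl, rfl⟩ <;> omega

theorem pvInnerFold_mem (n m : Int) (arr : List (List Int)) (vis : PySem.Set (Int × Int))
    (L : List (Int × Int)) (nx : PySem.Set (Int × Int)) (y : Int × Int) :
    y ∈ L.foldl (fun nx q =>
      if 0 ≤ q.1 ∧ q.1 < n ∧ 0 ≤ q.2 ∧ q.2 < m ∧ pvAt arr q.1 q.2 ≠ 1 ∧ ¬ q ∈ vis then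
        PySem.Set.add nx q
      else nx) nx ↔
    y ∈ nx ∨ (y ∈ L ∧ (0 ≤ y.1 ∧ y.1 < n ∧ 0 ≤ y.2 ∧ y.2 < m ∧ pvAt arr y.1 y.2 ≠ 1 ∧ ¬ y ∈ vis)) := by
  induction L generalizing nx with
  | nil => simp
  | cons q L ih =>
    rw [List.foldl_cons, ih]
    by_cases hC : 0 ≤ q.1 ∧ q.1 < n ∧ 0 ≤ q.2 ∧ q.2 < m ∧ pvAt arr q.1 q.2 ≠ 1 ∧ ¬ q ∈ vis
    · rw [if_pos hC]
      rw [PySem.Set.mem_add]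
      constructor
      · rintro ((h | rfl) | h)
        · exact Or.inl h
        · exact Or.inr ⟨by simp, hC⟩
        · exact Or.inr ⟨by simp [h.1], h.2⟩
      · rintro (h | ⟨hy, hCy⟩)
        · exact Or.inl (Or.inl h)
        · rcases List.mem_cons.mp hy with rfl | hy
          · exact Or.inl (Or.inr rfl)
          · exact Or.inr ⟨hy, hCy⟩
    · rw [if_neg hC]
      constructor
      · rintro (h | h)
        · exact Or.inl h
        · exact Or.inr ⟨by simp [h.1], h.2⟩
      · rintro (h | ⟨hy, hCy⟩)
        · exact Or.inl h
        · rcases List.mem_cons.mp hy with rfl | hy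
          · exact absurd hCy hC
          · exact Or.inr ⟨hy, hCy⟩

theorem pvNext_mem (n m : Int) (arr : List (List Int)) (vis fr : PySem.Set (Int × Int))
    (y : Int × Int) :
    y ∈ pvNext n m arr vis fr ↔
      (∃ p ∈ fr, y ∈ pvNbrs p.1 p.2) ∧
      (0 ≤ y.1 ∧ y.1 < n ∧ 0 ≤ y.2 ∧ y.2 < m ∧ pvAt arr y.1 y.2 ≠ 1 ∧ ¬ y ∈ vis) := by
  unfold pvNext
  have gen : ∀ (L : List (Int × Int)) (nx : PySem.Set (Int × Int)),
      y ∈ L.foldl (fun nx p =>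
        (pvNbrs p.1 p.2).foldl (fun nx q =>
          if 0 ≤ q.1 ∧ q.1 < n ∧ 0 ≤ q.2 ∧ q.2 < m ∧ pvAt arr q.1 q.2 ≠ 1 ∧ ¬ q ∈ vis then
            PySem.Set.add nx q
          else nx) nx) nx ↔
      y ∈ nx ∨ ((∃ p ∈ L, y ∈ pvNbrs p.1 p.2) ∧
        (0 ≤ y.1 ∧ y.1 < n ∧ 0 ≤ y.2 ∧ y.2 < m ∧ pvAt arr y.1 y.2 ≠ 1 ∧ ¬ y ∈ vis)) := by
    intro L
    induction L with
    | nil => simp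
    | cons p L ih =>
      intro nx
      rw [List.foldl_cons, ih, pvInnerFold_mem]
      constructor
      · rintro ((h | ⟨hy, hC⟩) | ⟨⟨p', hp', hy'⟩, hC⟩)
        · exact Or.inl h
        · exact Or.inr ⟨⟨p, by simp, hy⟩, hC⟩
        · exact Or.inr ⟨⟨p', by simp [hp'], hy'⟩, hC⟩
      · rintro (h | ⟨⟨p', hp', hy'⟩, hC⟩)
        · exact Or.inl (Or.inl h)
        · rcases List.mem_cons.mp hp' with rfl | hp'
          · exact Or.inl (Or.inr ⟨hy', hC⟩)
          · exact Or.inr ⟨⟨p', hp', hy'⟩, hC⟩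
  rw [gen]
  simp [PySem.Set.empty]

-- frontier/visited level invariant transported one round

theorem pvNext_level (n m : Int) (arr : List (List Int)) (k : Nat)
    (vis fr : PySem.Set (Int × Int))
    (Hvis : ∀ q, q ∈ vis ↔ pvReach n m arr k q = true)
    (Hfr : ∀ q, q ∈ fr ↔ (pvReach n m arr k q = true ∧ ∀ j < k, pvReach n m arr j q = false)) :
    ∀ q, q ∈ pvNext n m arr vis fr ↔
      (pvReach n m arr (k + 1) q = true ∧ ∀ j < k + 1, pvReach n m arr j q = false) := by
  intro q
  rw [pvNext_mem]
  constructor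
  · rintro ⟨⟨p, hp, hq⟩, h1, h2, h3, h4, h5, h6⟩
    obtain ⟨hpk, _⟩ := (Hfr p).mp hp
    obtain ⟨d, hd, rfl⟩ := (mem_pvNbrs p.1 p.2 q).mp hq
    have hnotk : pvReach n m arr k (p.1 + d.1, p.2 + d.2) = false := by
      rw [← Bool.not_eq_true]
      intro hk
      exact h6 ((Hvis _).mpr hk)
    constructor
    · simp only [pvReach, Bool.or_eq_true, Bool.and_eq_true, decide_eq_true_eq,
        List.any_eq_true]
      refine Or.inr ⟨⟨h1, h2, h3, h4, h5⟩, d, hd, ?_⟩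
      have : ((p.1 + d.1, p.2 + d.2).1 - d.1, (p.1 + d.1, p.2 + d.2).2 - d.2) = p := by
        obtain ⟨p1, p2⟩ := p
        simp
      rw [this]
      exact hpk
    · intro j hj
      rcases Nat.lt_or_ge j k with hjk | hjk
      · rw [← Bool.not_eq_true]
        intro hr
        have := pvReach_mono n m arr (Nat.le_of_lt hjk) hr
        rw [this] at hnotk
        exact absurd hnotk (by simp)
      · have : j = k := by omega
        subst this
        exact hnotk
  · rintro ⟨hk1, hmin⟩
    have hnotk : pvReach n m arr k q = false := hmin k (Nat.lt_succ_self k)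
    have hq1 := hk1
    simp only [pvReach, Bool.or_eq_true, Bool.and_eq_true, decide_eq_true_eq,
      List.any_eq_true] at hq1
    rcases hq1 with hq1 | ⟨hok, d, hd, hq1⟩
    · rw [hq1] at hnotk
      exact absurd hnotk (by simp)
    · set p : Int × Int := (q.1 - d.1, q.2 - d.2) with hp
      refine ⟨⟨p, ?_, ?_⟩, hok.1, hok.2.1, hok.2.2.1, hok.2.2.2.1, hok.2.2.2.2, ?_⟩
      · rw [Hfr]
        refine ⟨hq1, ?_⟩
        intro j hj
        rw [← Bool.not_eq_true]
        intro hr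
        have hreach : pvReach n m arr (j + 1) q = true := by
          simp only [pvReach, Bool.or_eq_true, Bool.and_eq_true, decide_eq_true_eq,
            List.any_eq_true]
          exact Or.inr ⟨⟨hok.1, hok.2.1, hok.2.2.1, hok.2.2.2.1, hok.2.2.2.2⟩, d, hd, hr⟩
        have := pvReach_mono n m arr (show j + 1 ≤ k by omega) hreach
        rw [this] at hnotk
        exact absurd hnotk (by simp)
      · rw [mem_pvNbrs]
        refine ⟨d, hd, ?_⟩
        obtain ⟨q1, q2⟩ := q
        simp [hp]
      · intro hv
        have := (Hvis q).mp hv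
        rw [this] at hnotk
        exact absurd hnotk (by simp)

-- if the target is never reachable the loop exhausts its fuel and returns INF

theorem pvLoopB_unreach (n m : Int) (arr : List (List Int)) (t : Int × Int)
    (hun : ∀ K : Nat, pvReach n m arr K t = false) :
    ∀ (fuel : Nat) (k : Nat) (depth : Int) (vis fr : PySem.Set (Int × Int)),
      (∀ q, q ∈ vis ↔ pvReach n m arr k q = true) →
      (∀ q, q ∈ fr ↔ (pvReach n m arr k q = true ∧ ∀ j < k, pvReach n m arr j q = false)) →
      pvLoopB n m arr t fuel depth vis fr = pvINF := by
  intro fuel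
  induction fuel with
  | zero => intro k depth vis fr _ _; rfl
  | succ fuel ih =>
    intro k depth vis fr Hvis Hfr
    show (if t ∈ fr then depth else _) = pvINF
    rw [if_neg ?_]
    · exact ih (k + 1) (depth + 1) _ _
        (fun q => by
          rw [PySem.Set.mem_union, Hvis, pvNext_level n m arr k vis fr Hvis Hfr q]
          constructor
          · rintro (h | ⟨h, _⟩)
            · exact pvReach_mono n m arr (Nat.le_succ k) h
            · exact h
          · intro h
            by_cases hk : pvReach n m arr k q = true
            · exact Or.inl hk
            · refine Or.inr ⟨h, ?_⟩
              intro j hj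
              rw [← Bool.not_eq_true]
              intro hr
              exact hk (pvReach_mono n m arr (by omega) hr))
        (fun q => pvNext_level n m arr k vis fr Hvis Hfr q)
    · intro hmem
      have := ((Hfr t).mp hmem).1
      rw [hun k] at this
      exact absurd this (by simp)

-- if the target is reachable at minimal level K < k + fuel the loop returns K

theorem pvLoopB_reach (n m : Int) (arr : List (List Int)) (t : Int × Int) (K : Nat)
    (hK : pvReach n m arr K t = true) (hmin : ∀ j < K, pvReach n m arr j t = false) :
    ∀ (fuel : Nat) (k : Nat) (vis fr : PySem.Set (Int × Int)),
      k ≤ K → K < k + fuel →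
      (∀ q, q ∈ vis ↔ pvReach n m arr k q = true) →
      (∀ q, q ∈ fr ↔ (pvReach n m arr k q = true ∧ ∀ j < k, pvReach n m arr j q = false)) →
      pvLoopB n m arr t fuel (k : Int) vis fr = (K : Int) := by
  intro fuel
  induction fuel with
  | zero => intro k vis fr h1 h2; omega
  | succ fuel ih =>
    intro k vis fr h1 h2 Hvis Hfr
    show (if t ∈ fr then (k : Int) else _) = (K : Int)
    by_cases hkK : k = K
    · rw [if_pos ?_]
      · exact congrArg _ hkK
      · rw [Hfr, hkK]
        exact ⟨hK, hmin⟩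
    · rw [if_neg ?_]
      · have hcast : ((k : Int) + 1) = ((k + 1 : Nat) : Int) := by push_cast; ring
        rw [hcast]
        exact ih (k + 1) _ _ (by omega) (by omega)
          (fun q => by
            rw [PySem.Set.mem_union, Hvis, pvNext_level n m arr k vis fr Hvis Hfr q]
            constructor
            · rintro (h | ⟨h, _⟩)
              · exact pvReach_mono n m arr (Nat.le_succ k) h
              · exact h
            · intro h
              by_cases hk : pvReach n m arr k q = true
              · exact Or.inl hk
              · refine Or.inr ⟨h, ?_⟩
                intro j hj
                rw [← Bool.not_eq_true]
                intro hr
                exact hk (pvReach_mono n m arr (by omega) hr))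
          (fun q => pvNext_level n m arr k vis fr Hvis Hfr q)
      · intro hmem
        have := ((Hfr t).mp hmem).1
        rw [hmin k (by omega)] at this
        exact absurd this (by simp)

def pvGridF (n m : Int) : Finset (Int × Int) := (pvCells n m).toFinset

def pvReachF (n m : Int) (arr : List (List Int)) (k : Nat) : Finset (Int × Int) :=
  (pvGridF n m).filter (fun q => pvReach n m arr k q = true)

theorem pvMem_reachF (n m : Int) (arr : List (List Int)) (k : Nat) (q : Int × Int) :
    q ∈ pvReachF n m arr k ↔ pvReach n m arr k q = true := by
  unfold pvReachF pvGridF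
  rw [Finset.mem_filter]
  constructor
  · exact fun h => h.2
  · intro h
    refine ⟨?_, h⟩
    have := pvReach_inb n m arr k q h
    rw [List.mem_toFinset, pvMem_pvCells]
    exact this

theorem pvCard_grid (n m : Int) : (pvGridF n m).card ≤ n.toNat * m.toNat := by
  unfold pvGridF
  calc (pvCells n m).toFinset.card ≤ (pvCells n m).length := (pvCells n m).toFinset_card_le
    _ = n.toNat * m.toNat := by
        simp [pvCells, List.length_flatMap, PySem.List.length_pyRange_one,
          Function.comp_def]

theorem pvFind_bound (n m : Int) (arr : List (List Int)) (t : Int × Int) (K : Nat)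
    (hK : pvReach n m arr K t = true) (hmin : ∀ j < K, pvReach n m arr j t = false)
    (s : Int × Int) (hs : pvReach n m arr 0 s = true) :
    K < n.toNat * m.toNat := by
  have grow : ∀ k, k ≤ K → k + 1 ≤ (pvReachF n m arr k).card := by
    intro k
    induction k with
    | zero =>
      intro _
      have : s ∈ pvReachF n m arr 0 := (pvMem_reachF n m arr 0 s).mpr hs
      have := Finset.card_pos.mpr ⟨s, this⟩
      omega
    | succ k ih =>
      intro hk
      have hsub : pvReachF n m arr k ⊆ pvReachF n m arr (k + 1) := by
        intro q hq
        rw [pvMem_reachF] at hq ⊢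
        exact pvReach_mono n m arr (Nat.le_succ k) hq
      have hdiff : ∃ q, pvReach n m arr (k + 1) q = true ∧ pvReach n m arr k q ≠ true := by
        by_contra hcon
        push_neg at hcon
        have hstabk : ∀ q, pvReach n m arr (k + 1) q = pvReach n m arr k q := by
          intro q
          by_cases h1 : pvReach n m arr (k + 1) q = true
          · rw [h1, (hcon q h1 ▸ rfl : pvReach n m arr k q = true)]
          · by_cases h2 : pvReach n m arr k q = true
            · exact absurd (pvReach_mono n m arr (Nat.le_succ k) h2) h1
            · rw [Bool.not_eq_true] at h1 h2
              rw [h1, h2]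
        have := pvReach_stab n m arr k hstabk K (by omega) t
        rw [hK] at this
        have hkt := hmin k (by omega)
        rw [hkt] at this
        exact absurd this (by simp)
      obtain ⟨q, hq1, hq2⟩ := hdiff
      have hss : pvReachF n m arr k ⊂ pvReachF n m arr (k + 1) := by
        refine Finset.ssubset_iff_of_subset hsub |>.mpr ?_
        exact ⟨q, (pvMem_reachF n m arr (k + 1) q).mpr hq1,
          fun hc => hq2 ((pvMem_reachF n m arr k q).mp hc)⟩
      have := Finset.card_lt_card hss
      have := ih (by omega)
      omega
  have h1 := grow K (Nat.le_refl K)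
  have h2 : (pvReachF n m arr K).card ≤ (pvGridF n m).card :=
    Finset.card_le_card (Finset.filter_subset _ _)
  have h3 := pvCard_grid n m
  omega

theorem user_logic_main (n : Int) (m : Int) (perkm_ola_cost : Int) (perkm_uber_cost : Int)
    (arr : List (List Int)) (hPre : Pre_user_logic n m perkm_ola_cost perkm_uber_cost arr) :
    user_logic n m perkm_ola_cost perkm_uber_cost arr =
      user_logic_alt n m perkm_ola_cost perkm_uber_cost arr := by
  by_cases h2 : (pvCells n m).filter (fun p => decide (pvAt arr p.1 p.2 = 2)) = []
  · simp only [user_logic, user_logic_alt, pvScanA_spec, pvStartsB_eq n m arr 2,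
      pvStartsB_eq n m arr 3, h2]
    simp
  by_cases h3 : (pvCells n m).filter (fun p => decide (pvAt arr p.1 p.2 = 3)) = []
  · simp only [user_logic, user_logic_alt, pvScanA_spec, pvStartsB_eq n m arr 2,
      pvStartsB_eq n m arr 3, h3]
    simp [h2]
  · obtain ⟨S3', t0, hS3eq⟩ := (List.eq_nil_or_concat'
      ((pvCells n m).filter (fun p => decide (pvAt arr p.1 p.2 = 3)))).resolve_left h3
    have hstart : ∀ q, q ∈ ((pvCells n m).filter (fun p => decide (pvAt arr p.1 p.2 = 2))) ↔ pvReach n m arr 0 q = true := by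
      intro q
      simp only [List.mem_filter, decide_eq_true_eq, pvMem_pvCells, pvReach]
      constructor
      · rintro ⟨⟨a, b, c, d⟩, e⟩
        simp [a, b, c, d, e]
      · intro h
        simp only [decide_eq_true_eq] at h
        exact ⟨⟨h.1, h.2.1, h.2.2.1, h.2.2.2.1⟩, h.2.2.2.2⟩
    have ht0mem : t0 ∈ (pvCells n m).filter (fun p => decide (pvAt arr p.1 p.2 = 3)) := by
      rw [hS3eq]
      simp
    have ht0inb : 0 ≤ t0.1 ∧ t0.1 < n ∧ 0 ≤ t0.2 ∧ t0.2 < m := by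
      have := List.mem_filter.mp ht0mem
      exact (pvMem_pvCells n m t0).mp this.1
    have npos : 0 < n := by omega
    have mpos : 0 < m := by omega
    have hNM : n * m < 10 ^ 18 := (hPre ⟨npos, mpos⟩).2.2
    have hmul : n * m = ((n.toNat * m.toNat : Nat) : Int) := by
      push_cast
      rw [Int.toNat_of_nonneg npos.le, Int.toNat_of_nonneg mpos.le]
    have hINFval : pvINF = 10 ^ 18 := rfl
    have hi1 := (pvInit_spec ((pvCells n m).filter (fun p => decide (pvAt arr p.1 p.2 = 2))) (fun _ => pvINF) []).1
    have hi2 := (pvInit_spec ((pvCells n m).filter (fun p => decide (pvAt arr p.1 p.2 = 2))) (fun _ => pvINF) []).2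
    rw [List.nil_append] at hi2
    have hInv : pvInvA n m arr (List.foldl pvInitStep ((fun _ => pvINF), []) ((pvCells n m).filter (fun p => decide (pvAt arr p.1 p.2 = 2)))).1 (List.foldl pvInitStep ((fun _ => pvINF), []) ((pvCells n m).filter (fun p => decide (pvAt arr p.1 p.2 = 2)))).2 := by
      refine ⟨?_, ?_, ?_, ?_, ?_⟩
      · intro q
        rw [hi1 q]
        by_cases hq : q ∈ ((pvCells n m).filter (fun p => decide (pvAt arr p.1 p.2 = 2))) <;> simp [hq, pvINF]
      · intro q hq
        rw [hi1 q] at hq ⊢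
        by_cases hqm : q ∈ ((pvCells n m).filter (fun p => decide (pvAt arr p.1 p.2 = 2)))
        · simp only [hqm, if_pos]
          simpa using (hstart q).mp hqm
        · simp [hqm] at hq
      · intro q hq
        rw [hi2] at hq
        rw [hi1 q]
        simp [hq, pvINF]
      · intro q hq
        rw [hi1 q]
        have := (hstart q).mpr hq
        simp [this]
      · intro u hu hnin d hd hok
        exfalso
        rw [hi1 u] at hu
        rw [hi2] at hnin
        by_cases hum : u ∈ ((pvCells n m).filter (fun p => decide (pvAt arr p.1 p.2 = 2)))
        · exact hnin hum
        · simp [hum, pvINF] at hu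
    have FC := pvBfsA_spec n m arr (List.foldl pvInitStep ((fun _ => pvINF), []) ((pvCells n m).filter (fun p => decide (pvAt arr p.1 p.2 = 2)))).1 (List.foldl pvInitStep ((fun _ => pvINF), []) ((pvCells n m).filter (fun p => decide (pvAt arr p.1 p.2 = 2)))).2 (pvInit_nonneg ((pvCells n m).filter (fun p => decide (pvAt arr p.1 p.2 = 2)))) hInv
    obtain ⟨s0, hs0⟩ := List.exists_mem_of_ne_nil _ h2
    have hs0r : pvReach n m arr 0 s0 = true := (hstart s0).mp hs0
    have Hvis : ∀ q, q ∈ PySem.Set.ofList ((pvCells n m).filter (fun p => decide (pvAt arr p.1 p.2 = 2))) ↔ pvReach n m arr 0 q = true := by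
      intro q
      rw [PySem.Set.mem_ofList]
      exact hstart q
    have Hfr : ∀ q, q ∈ PySem.Set.ofList ((pvCells n m).filter (fun p => decide (pvAt arr p.1 p.2 = 2))) ↔
        (pvReach n m arr 0 q = true ∧ ∀ j < 0, pvReach n m arr j q = false) := by
      intro q
      rw [Hvis q]
      exact ⟨fun h => ⟨h, fun j hj => absurd hj (by omega)⟩, fun h => h.1⟩
    by_cases hre : ∃ K : Nat, pvReach n m arr K t0 = true
    · have hK := Nat.find_spec hre
      have hmin : ∀ j < Nat.find hre, pvReach n m arr j t0 = false := by
        intro j hj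
        have := Nat.find_min hre hj
        rwa [Bool.not_eq_true] at this
      have hbound : Nat.find hre < n.toNat * m.toNat :=
        pvFind_bound n m arr t0 _ hK hmin s0 hs0r
      have hKINF : ((Nat.find hre : Nat) : Int) < pvINF := by
        rw [hINFval]
        omega
      have hA : (pvBfsA n m arr (List.foldl pvInitStep ((fun _ => pvINF), []) ((pvCells n m).filter (fun p => decide (pvAt arr p.1 p.2 = 2)))).1 (List.foldl pvInitStep ((fun _ => pvINF), []) ((pvCells n m).filter (fun p => decide (pvAt arr p.1 p.2 = 2)))).2 (pvInit_nonneg ((pvCells n m).filter (fun p => decide (pvAt arr p.1 p.2 = 2))))) t0 = ((Nat.find hre : Nat) : Int) := by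
        have hle := FC.2.2.2 (Nat.find hre) hKINF t0 hK
        have hnn := FC.1 t0
        have hfin : (pvBfsA n m arr (List.foldl pvInitStep ((fun _ => pvINF), []) ((pvCells n m).filter (fun p => decide (pvAt arr p.1 p.2 = 2)))).1 (List.foldl pvInitStep ((fun _ => pvINF), []) ((pvCells n m).filter (fun p => decide (pvAt arr p.1 p.2 = 2)))).2 (pvInit_nonneg ((pvCells n m).filter (fun p => decide (pvAt arr p.1 p.2 = 2))))) t0 < pvINF := lt_of_le_of_lt hle hKINF
        have hr := FC.2.2.1 t0 hfin
        have hge := Nat.find_min' hre hr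
        omega
      have hB : (pvLoopB n m arr t0 (n * m + 1).toNat 0 (PySem.Set.ofList ((pvCells n m).filter (fun p => decide (pvAt arr p.1 p.2 = 2)))) (PySem.Set.ofList ((pvCells n m).filter (fun p => decide (pvAt arr p.1 p.2 = 2))))) = ((Nat.find hre : Nat) : Int) := by
        have hfuel : Nat.find hre < 0 + (n * m + 1).toNat := by omega
        have := pvLoopB_reach n m arr t0 (Nat.find hre) hK hmin
          ((n * m + 1).toNat) 0 (PySem.Set.ofList ((pvCells n m).filter (fun p => decide (pvAt arr p.1 p.2 = 2)))) (PySem.Set.ofList ((pvCells n m).filter (fun p => decide (pvAt arr p.1 p.2 = 2))))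
          (Nat.zero_le _) hfuel Hvis Hfr
        simpa using this
      simp only [user_logic, user_logic_alt, pvScanA_spec, pvStartsB_eq n m arr 2,
        pvStartsB_eq n m arr 3, hS3eq, List.getLast?_concat,
        PySem.List.pyGetD_neg_one_append_singleton]
      rw [← hS3eq] at *
      rw [hA, hB]
      simp [h2, h3]
    · have hun : ∀ K : Nat, pvReach n m arr K t0 = false := by
        intro K
        rw [← Bool.not_eq_true]
        exact fun h => hre ⟨K, h⟩
      have hA : (pvBfsA n m arr (List.foldl pvInitStep ((fun _ => pvINF), []) ((pvCells n m).filter (fun p => decide (pvAt arr p.1 p.2 = 2)))).1 (List.foldl pvInitStep ((fun _ => pvINF), []) ((pvCells n m).filter (fun p => decide (pvAt arr p.1 p.2 = 2)))).2 (pvInit_nonneg ((pvCells n m).filter (fun p => decide (pvAt arr p.1 p.2 = 2))))) t0 = pvINF := by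
        have h1 := FC.2.1 t0
        rcases lt_or_eq_of_le h1 with h1 | h1
        · have := FC.2.2.1 t0 h1
          rw [hun _] at this
          exact absurd this (by simp)
        · exact h1
      have hB : (pvLoopB n m arr t0 (n * m + 1).toNat 0 (PySem.Set.ofList ((pvCells n m).filter (fun p => decide (pvAt arr p.1 p.2 = 2)))) (PySem.Set.ofList ((pvCells n m).filter (fun p => decide (pvAt arr p.1 p.2 = 2))))) = pvINF :=
        pvLoopB_unreach n m arr t0 hun ((n * m + 1).toNat) 0 0
          (PySem.Set.ofList ((pvCells n m).filter (fun p => decide (pvAt arr p.1 p.2 = 2)))) (PySem.Set.ofList ((pvCells n m).filter (fun p => decide (pvAt arr p.1 p.2 = 2)))) Hvis Hfr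
      simp only [user_logic, user_logic_alt, pvScanA_spec, pvStartsB_eq n m arr 2,
        pvStartsB_eq n m arr 3, hS3eq, List.getLast?_concat,
        PySem.List.pyGetD_neg_one_append_singleton]
      rw [← hS3eq] at *
      rw [hA, hB]
      simp [h2, h3]

-- ===== VERDICT (by name: the statement is the Claim_ definition above) =====
theorem user_logic_spec : Claim_equal_user_logic := by
  intro n m perkm_ola_cost perkm_uber_cost arr _ hPre
  unfold Spec_user_logic
  exact user_logic_main n m perkm_ola_cost perkm_uber_cost arr hPre
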